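-- pv_equiv track=rewrite | github.com/EasyScience/EasyExampleApp | EasyExampleApp/Logic/Helpers.py | edCifToCryspyCif
-- ===== SOURCE A (Python) =====
-- def edCifToCryspyCif(edCif):
--     cryspyCif = edCif
--     edToCryspyNamesMap = {
--         '_diffrn_radiation_probe': '_setup_radiation',
--         '_diffrn_radiation_wavelength': '_setup_wavelength',
--         '_pd_meas_2theta_offset': '_setup_offset_2theta',
--         '_pd_meas_2theta_range_min': '_range_2theta_min',
--         '_pd_meas_2theta_range_max': '_range_2theta_max'
--     }
--     edToCryspyValuesMap = {
--         'neutron': 'neutrons',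
--         'x-ray': 'X-rays'
--     }
--     for edName, cryspyName in edToCryspyNamesMap.items():
--         cryspyCif = cryspyCif.replace(edName, cryspyName)
--     for edValue, cryspyValue in edToCryspyValuesMap.items():
--         cryspyCif = cryspyCif.replace(edValue, cryspyValue)
--     return cryspyCif
-- ===== SOURCE B (Python) =====
-- # B: one combined ordered replacement table applied by recursion, each rewrite
-- # done as new.join(s.split(old)) instead of str.replace -- same sequential
-- # left-to-right semantics, different decomposition.
-- _ED_TO_CRYSPY = [
--     ('_diffrn_radiation_probe', '_setup_radiation'),
--     ('_diffrn_radiation_wavelength', '_setup_wavelength'),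
--     ('_pd_meas_2theta_offset', '_setup_offset_2theta'),
--     ('_pd_meas_2theta_range_min', '_range_2theta_min'),
--     ('_pd_meas_2theta_range_max', '_range_2theta_max'),
--     ('neutron', 'neutrons'),
--     ('x-ray', 'X-rays'),
-- ]
--
--
-- def edCifToCryspyCif(edCif):
--     def rewrite(s, pairs):
--         if not pairs:
--             return s
--         old, new = pairs[0]
--         return rewrite(new.join(s.split(old)), pairs[1:])
--     return rewrite(edCif, _ED_TO_CRYSPY)
-- ===== Notes on version B (the rewrite author's own statement) =====
-- stated objective: alternative
-- what changed: Replaces the two dict loops of str.replace calls by one combined ordered replacement table applied by recursion over the pair list, each rewrite done as new.join(s.split(old)) instead of str.replace.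
import Mathlib
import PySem

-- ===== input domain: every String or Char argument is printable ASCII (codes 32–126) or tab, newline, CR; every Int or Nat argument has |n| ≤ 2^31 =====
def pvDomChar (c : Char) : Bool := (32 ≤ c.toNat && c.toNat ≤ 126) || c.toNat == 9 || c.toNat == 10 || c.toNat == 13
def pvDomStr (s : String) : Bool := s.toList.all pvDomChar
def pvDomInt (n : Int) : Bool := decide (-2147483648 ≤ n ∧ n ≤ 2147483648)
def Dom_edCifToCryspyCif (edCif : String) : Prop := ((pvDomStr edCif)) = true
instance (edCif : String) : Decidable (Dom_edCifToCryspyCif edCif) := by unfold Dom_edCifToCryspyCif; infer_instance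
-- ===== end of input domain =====

-- B replaces A's two dict loops of str.replace by one combined ordered table applied
-- recursively, each rewrite done as new.join(s.split(old)); same cost, different decomposition.

-- ===== PORT A =====
def edCifToCryspyCif (edCif : String) : String :=
  let cryspyCif := edCif
  let edToCryspyNamesMap : PySem.Dict String String := PySem.Dict.ofList
    [("_diffrn_radiation_probe", "_setup_radiation"),
     ("_diffrn_radiation_wavelength", "_setup_wavelength"),
     ("_pd_meas_2theta_offset", "_setup_offset_2theta"),
     ("_pd_meas_2theta_range_min", "_range_2theta_min"),
     ("_pd_meas_2theta_range_max", "_range_2theta_max")]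
  let edToCryspyValuesMap : PySem.Dict String String := PySem.Dict.ofList
    [("neutron", "neutrons"),
     ("x-ray", "X-rays")]
  let cryspyCif := edToCryspyNamesMap.items.foldl
    (fun c (p : String × String) => PySem.Str.replace c p.1 p.2) cryspyCif
  let cryspyCif := edToCryspyValuesMap.items.foldl
    (fun c (p : String × String) => PySem.Str.replace c p.1 p.2) cryspyCif
  cryspyCif

-- ===== PORT B =====
def pvEdToCryspy : List (String × String) :=
  [("_diffrn_radiation_probe", "_setup_radiation"),
   ("_diffrn_radiation_wavelength", "_setup_wavelength"),
   ("_pd_meas_2theta_offset", "_setup_offset_2theta"),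
   ("_pd_meas_2theta_range_min", "_range_2theta_min"),
   ("_pd_meas_2theta_range_max", "_range_2theta_max"),
   ("neutron", "neutrons"),
   ("x-ray", "X-rays")]

-- 'new.join(s.split(old))': PySem.Chars.splitOn is exactly str.split for a nonempty
-- separator, and every 'old' in the table is a nonempty literal.
def pvRewrite : String → List (String × String) → String
  | s, [] => s
  | s, (old, new) :: rest =>
      pvRewrite (String.ofList (PySem.Chars.join new.toList
        (PySem.Chars.splitOn s.toList old.toList))) rest

def edCifToCryspyCif_alt (edCif : String) : String :=
  pvRewrite edCif pvEdToCryspy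

-- ===== PRECONDITION & SPEC =====
def Spec_edCifToCryspyCif (edCif : String) (out : String) : Prop := out = edCifToCryspyCif_alt edCif
instance (edCif : String) (out : String) : Decidable (Spec_edCifToCryspyCif edCif out) := by unfold Spec_edCifToCryspyCif; infer_instance

-- ===== CLAIM (what is proved, stated in full; the proofs are below) =====
def Claim_equal_edCifToCryspyCif : Prop := ∀ (edCif : String), Dom_edCifToCryspyCif edCif → Spec_edCifToCryspyCif edCif (edCifToCryspyCif edCif)

-- ===== LEMMAS AND PROOFS =====

-- replace.go is accumulator-homomorphic
theorem pvGoRAcc (old new : List Char) (fuel : ℕ) (l acc : List Char) :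
    PySem.Chars.replace.go old new fuel l acc = acc.reverse ++ PySem.Chars.replace.go old new fuel l [] := by
  induction fuel generalizing l acc with
  | zero => simp [PySem.Chars.replace.go]
  | succ f ih =>
    cases l with
    | nil => simp [PySem.Chars.replace.go]
    | cons c t =>
      rw [PySem.Chars.replace.go, PySem.Chars.replace.go]
      split_ifs with h
      · rw [ih _ (new.reverse ++ acc), ih _ (new.reverse ++ [])]
        simp
      · rw [ih _ (c :: acc), ih _ (c :: [])]
        simp

-- splitOn.go is accumulator-homomorphic
theorem pvGoSAcc (sep : List Char) (fuel : ℕ) (l cur : List Char) (acc : List (List Char)) :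
    PySem.Chars.splitOn.go sep fuel l cur acc = acc.reverse ++ PySem.Chars.splitOn.go sep fuel l cur [] := by
  induction fuel generalizing l cur acc with
  | zero => simp [PySem.Chars.splitOn.go]
  | succ f ih =>
    cases l with
    | nil => simp [PySem.Chars.splitOn.go]
    | cons c t =>
      rw [PySem.Chars.splitOn.go, PySem.Chars.splitOn.go]
      split_ifs with h
      · rw [ih _ [] (cur.reverse :: acc), ih _ [] (cur.reverse :: [])]
        simp
      · rw [ih _ (c :: cur) acc]

theorem pvGoSNeNil (sep : List Char) (fuel : ℕ) (l cur : List Char) :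
    PySem.Chars.splitOn.go sep fuel l cur [] ≠ [] := by
  induction fuel generalizing l cur with
  | zero => simp [PySem.Chars.splitOn.go]
  | succ f ih =>
    cases l with
    | nil => simp [PySem.Chars.splitOn.go]
    | cons c t =>
      rw [PySem.Chars.splitOn.go]
      split_ifs with h
      · rw [pvGoSAcc]
        simp
      · exact ih t (c :: cur)

-- the two fuel loops walk the string in lockstep: joining the split pieces is replace
theorem pvJoinGo (old new : List Char) (hold : old ≠ []) (fr : ℕ) :
    ∀ (fs : ℕ) (l cur : List Char), l.length ≤ fr → l.length ≤ fs →
      PySem.Chars.join new (PySem.Chars.splitOn.go old fs l cur []) =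
        cur.reverse ++ PySem.Chars.replace.go old new fr l [] := by
  induction fr with
  | zero =>
    intro fs l cur h1 _
    have : l = [] := List.eq_nil_of_length_eq_zero (Nat.le_zero.mp h1)
    subst this
    cases fs <;> simp [PySem.Chars.splitOn.go, PySem.Chars.replace.go, PySem.Chars.join, List.intercalate]
  | succ f ih =>
    intro fs l cur h1 h2
    cases l with
    | nil =>
      cases fs <;> simp [PySem.Chars.splitOn.go, PySem.Chars.replace.go, PySem.Chars.join, List.intercalate]
    | cons c t =>
      cases fs with
      | zero => simp at h2
      | succ g =>
        rw [PySem.Chars.splitOn.go, PySem.Chars.replace.go]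
        split_ifs with h
        · have hdrop : (List.drop old.length (c::t)).length ≤ f := by
            have : 1 ≤ old.length := Nat.one_le_iff_ne_zero.mpr (by simpa using hold)
            simp only [List.length_drop, List.length_cons]
            simp only [List.length_cons] at h1
            omega
          have hdropg : (List.drop old.length (c::t)).length ≤ g := by
            have hol : 1 ≤ old.length := Nat.one_le_iff_ne_zero.mpr (by simpa using hold)
            simp only [List.length_drop, List.length_cons]
            simp at h2
            omega
          rw [pvGoSAcc, pvGoRAcc]
          have hne := pvGoSNeNil old g (List.drop old.length (c::t)) []
          obtain ⟨x, xs, hx⟩ := List.exists_cons_of_ne_nil hne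
          rw [List.reverse_cons, List.reverse_nil, List.nil_append, List.singleton_append, hx,
            PySem.Chars.join_cons_cons]
          rw [← hx, ih g (List.drop old.length (c::t)) [] hdrop hdropg]
          simp
        · have ht : t.length ≤ f := by simp at h1; omega
          have htg : t.length ≤ g := by simp at h2; omega
          rw [ih g t (c :: cur) ht htg, pvGoRAcc old new f t [c]]
          simp

-- str.replace(old, new) = new.join(s.split(old)) for nonempty old
theorem pvReplaceEqJoinSplit (s old new : List Char) (hold : old ≠ []) :
    PySem.Chars.replace s old new = PySem.Chars.join new (PySem.Chars.splitOn s old) := by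
  rw [PySem.Chars.replace, PySem.Chars.splitOn]
  rw [if_neg (by simpa using hold)]
  rw [pvJoinGo old new hold s.length (s.length + 1) s [] le_rfl (Nat.le_succ _)]
  simp

theorem pvStrStep (s old new : String) (hold : old.toList ≠ []) :
    PySem.Str.replace s old new =
      String.ofList (PySem.Chars.join new.toList (PySem.Chars.splitOn s.toList old.toList)) := by
  rw [PySem.Str.replace, pvReplaceEqJoinSplit _ _ _ hold]

-- ===== VERDICT (by name: the statement is the Claim_ definition above) =====
theorem edCifToCryspyCif_spec : Claim_equal_edCifToCryspyCif := by
  intro edCif _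
  unfold Spec_edCifToCryspyCif edCifToCryspyCif edCifToCryspyCif_alt pvEdToCryspy
  simp only [pvRewrite]
  rw [show (PySem.Dict.ofList
      [("_diffrn_radiation_probe", "_setup_radiation"),
       ("_diffrn_radiation_wavelength", "_setup_wavelength"),
       ("_pd_meas_2theta_offset", "_setup_offset_2theta"),
       ("_pd_meas_2theta_range_min", "_range_2theta_min"),
       ("_pd_meas_2theta_range_max", "_range_2theta_max")] : PySem.Dict String String).items =
      [("_diffrn_radiation_probe", "_setup_radiation"),
       ("_diffrn_radiation_wavelength", "_setup_wavelength"),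
       ("_pd_meas_2theta_offset", "_setup_offset_2theta"),
       ("_pd_meas_2theta_range_min", "_range_2theta_min"),
       ("_pd_meas_2theta_range_max", "_range_2theta_max")] from by decide]
  rw [show (PySem.Dict.ofList [("neutron", "neutrons"), ("x-ray", "X-rays")] : PySem.Dict String String).items =
      [("neutron", "neutrons"), ("x-ray", "X-rays")] from by decide]
  simp only [List.foldl]
  rw [pvStrStep _ _ _ (by decide), pvStrStep _ _ _ (by decide), pvStrStep _ _ _ (by decide),
    pvStrStep _ _ _ (by decide), pvStrStep _ _ _ (by decide), pvStrStep _ _ _ (by decide),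
    pvStrStep _ _ _ (by decide)]
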